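-- pv_equiv track=rewrite | github.com/CkimiHoK/OtusAlgorithm | module_1/lesson_3/fen.py | convert_fen_to_bbd
-- ===== SOURCE A (Python) =====
-- def convert_fen_to_bbd(str_array):
--     """ Convert FEN representation of chess field to bit board definition format. """
--     fen_str = str_array[0]
--
--     chess_desc_rows = [row for row in fen_str.split('/')]  # Split figures positions to chess rows
--     chess_desc_rows.reverse()  # Reverse rows position. Now they are directed from the bottom to up
--
--     figures_positions = ''.join(chess_desc_rows)
--
--     result_figure_indexes = 'PNBRQKpnbrqk'  # figure's indexes in result
--     result_positions_list = [0 for _ in range(12)]  # figure's positions in bbd format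
--
--     index = 0
--     for item in figures_positions:  # check all fen positions
--         if item.isdigit():  # skip numbers
--             index += int(item)
--         else:
--             item_index = result_figure_indexes.index(item)
--             result_positions_list[item_index] += 1 << index
--             index += 1
--
--     return '\n'.join([str(pos) for pos in result_positions_list])  # convert to list of string and return one with NL
-- ===== SOURCE B (Python) =====
-- def convert_fen_to_bbd(str_array):
--     """ Convert FEN representation of chess field to bit board definition format. """
--     fen_str = str_array[0]
--     rows = fen_str.split('/')
--     rows.reverse()
--     # phase 1: expand the stream into an explicit board (None = empty square)
--     board = []
--     for ch in ''.join(rows):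
--         if ch.isdigit():
--             board.extend([None] * int(ch))
--         else:
--             board.append(ch)
--     # phase 2: aggregate the 12 bitboards over the enumerated board
--     figures = 'PNBRQKpnbrqk'
--     acc = [0] * 12
--     for i, f in enumerate(board):
--         if f is not None:
--             acc[figures.index(f)] += 1 << i
--     return '\n'.join(str(x) for x in acc)
-- ===== Notes on version B (the rewrite author's own statement) =====
-- stated objective: alternative
-- what changed: Replaces A's single loop that threads a running square index through the accumulation with a two-pass expand-then-aggregate structure: the FEN stream is first expanded into an explicit board list (each digit d becomes d empty placeholders), then a second enumeration pass adds 1<<i into the matching figure's slot; Pre_ excludes exactly the inputs where A raises (empty list, or a character that is neither a digit, '/', nor one of PNBRQKpnbrqk).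
import Mathlib
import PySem

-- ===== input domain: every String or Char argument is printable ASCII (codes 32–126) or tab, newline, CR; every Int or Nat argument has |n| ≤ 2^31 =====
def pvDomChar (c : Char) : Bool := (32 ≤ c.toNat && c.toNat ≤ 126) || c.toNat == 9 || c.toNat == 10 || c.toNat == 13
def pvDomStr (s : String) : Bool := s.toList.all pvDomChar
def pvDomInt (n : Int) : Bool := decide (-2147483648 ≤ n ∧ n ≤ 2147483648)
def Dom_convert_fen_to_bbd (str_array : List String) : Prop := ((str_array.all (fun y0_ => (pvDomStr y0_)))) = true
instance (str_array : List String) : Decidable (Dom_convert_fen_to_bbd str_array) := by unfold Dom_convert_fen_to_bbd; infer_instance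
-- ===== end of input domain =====

-- B replaces A's single running-index loop with an expand-then-aggregate two-pass
-- structure over an explicit board list (objective: alternative decomposition).

-- ===== PORT A =====
-- 'PNBRQKpnbrqk', figure's indexes in result
def pvFigs : List Char := ['P','N','B','R','Q','K','p','n','b','r','q','k']

-- one iteration of A's loop; state = (index, result_positions_list).
-- item not a digit and not in pvFigs would be a ValueError in Python (excluded by Pre_);
-- the index is never negative, so '1 << index' is (1 : Int) <<< index.toNat exactly.
def pvStepA (s : Int × List Int) (item : Char) : Int × List Int :=
  if PySem.Chars.isdigit item then
    (s.1 + (PySem.Int.ofChars? [item]).getD 0, s.2)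
  else
    let item_index := (PySem.List.index? pvFigs item).getD 0
    (s.1 + 1, s.2.set item_index (s.2.getD item_index 0 + (1 : Int) <<< s.1.toNat))

def convert_fen_to_bbd (str_array : List String) : String :=
  let fen_str := (PySem.List.pyGet? str_array 0).getD ""  -- IndexError on [] is excluded by Pre_
  let chess_desc_rows := (PySem.Chars.splitOn fen_str.toList ['/']).reverse
  let figures_positions := PySem.Chars.join [] chess_desc_rows
  let res := figures_positions.foldl pvStepA (0, List.replicate 12 0)
  PySem.Str.join "\n" (res.2.map PySem.Int.toStr)

-- ===== PORT B =====
-- phase 1 step: expand one stream character onto the board (none = empty square)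
def pvExpand (b : List (Option Char)) (ch : Char) : List (Option Char) :=
  if PySem.Chars.isdigit ch then
    b ++ List.replicate ((PySem.Int.ofChars? [ch]).getD 0).toNat none
  else
    b ++ [some ch]

-- 'acc[figures.index(f)] += 1 << i' (enumerate indices are never negative)
def pvBump (acc : List Int) (f : Char) (i : Int) : List Int :=
  let j := (PySem.List.index? pvFigs f).getD 0
  acc.set j (acc.getD j 0 + (1 : Int) <<< i.toNat)

-- phase 2 step: 'if f is not None: acc[figures.index(f)] += 1 << i'
def pvStep2 (l : List Int) (p : Int × Option Char) : List Int :=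
  match p.2 with
  | some f => pvBump l f p.1
  | none => l

def convert_fen_to_bbd_alt (str_array : List String) : String :=
  let fen_str := (PySem.List.pyGet? str_array 0).getD ""
  let rows := (PySem.Chars.splitOn fen_str.toList ['/']).reverse
  let board := (PySem.Chars.join [] rows).foldl pvExpand []
  let acc := (PySem.List.enumerate board 0).foldl pvStep2 (List.replicate 12 0)
  PySem.Str.join "\n" (acc.map PySem.Int.toStr)

-- ===== PRECONDITION & SPEC =====
-- Pre_ excludes exactly the inputs on which the Python A raises: the empty list
-- (IndexError on str_array[0]) and strings containing a character that is neither a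
-- digit, '/', nor one of 'PNBRQKpnbrqk' ('PNBRQKpnbrqk'.index raises ValueError there).
def Pre_convert_fen_to_bbd (str_array : List String) : Prop :=
  str_array ≠ [] ∧
  (str_array.headD "").toList.all
    (fun c => PySem.Chars.isdigit c ||
      c ∈ ['/','P','N','B','R','Q','K','p','n','b','r','q','k']) = true
instance (str_array : List String) : Decidable (Pre_convert_fen_to_bbd str_array) := by
  unfold Pre_convert_fen_to_bbd; infer_instance

def pvWitness_convert_fen_to_bbd : List String := ["rnbqkbnr/pppppppp/8/8/8/8/PPPPPPPP/RNBQKBNR"]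

def Spec_convert_fen_to_bbd (str_array : List String) (out : String) : Prop := out = convert_fen_to_bbd_alt str_array
instance (str_array : List String) (out : String) : Decidable (Spec_convert_fen_to_bbd str_array out) := by unfold Spec_convert_fen_to_bbd; infer_instance

-- ===== CLAIM (what is proved, stated in full; the proofs are below) =====
def Claim_equal_convert_fen_to_bbd : Prop := ∀ (str_array : List String), Dom_convert_fen_to_bbd str_array → Pre_convert_fen_to_bbd str_array → Spec_convert_fen_to_bbd str_array (convert_fen_to_bbd str_array)

-- ===== LEMMAS AND PROOFS =====

theorem pvWitness_ok :
    Dom_convert_fen_to_bbd pvWitness_convert_fen_to_bbd ∧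
    Pre_convert_fen_to_bbd pvWitness_convert_fen_to_bbd := by decide

-- a digit's int() value is a nonnegative integer
theorem pv_map_map_cast_nonneg (o : Option Nat) :
    0 ≤ ((Option.map (fun n => n) (Option.map (Nat.cast : Nat → Int) o)).getD 0) := by
  cases o <;> simp

theorem pv_digit_nonneg (c : Char) (h : PySem.Chars.isdigit c = true) :
    0 ≤ (PySem.Int.ofChars? [c]).getD 0 := by
  have hs : PySem.Int.isIntSpace c = false := by
    simp only [PySem.Int.isIntSpace, Bool.or_eq_false_iff, decide_eq_false_iff_not]
    refine ⟨⟨⟨⟨⟨?_,?_⟩,?_⟩,?_⟩,?_⟩,?_⟩ <;> rintro rfl <;> revert h <;> decide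
  have hm : c ≠ '-' := by rintro rfl; revert h; decide
  have hp : c ≠ '+' := by rintro rfl; revert h; decide
  simp only [PySem.Int.ofChars?, List.dropWhile, hs, List.reverse_singleton]
  split
  · rename_i ds heq; simp_all
  · rename_i ds heq; simp_all
  · simp only [Option.map_eq_map, bind_pure_comp]
    exact pv_map_map_cast_nonneg _

-- one expansion equals the board segment of one character
def pvSquares (ch : Char) : List (Option Char) :=
  if PySem.Chars.isdigit ch then
    List.replicate ((PySem.Int.ofChars? [ch]).getD 0).toNat none
  else [some ch]

theorem pvExpand_eq (b : List (Option Char)) (ch : Char) :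
    pvExpand b ch = b ++ pvSquares ch := by
  unfold pvExpand pvSquares; split <;> rfl

theorem pvBoard_eq (cs : List Char) (b : List (Option Char)) :
    cs.foldl pvExpand b = b ++ cs.flatMap pvSquares := by
  induction cs generalizing b with
  | nil => simp
  | cons c t ih => simp [List.foldl_cons, pvExpand_eq, ih]

-- aggregating over empty placeholders changes nothing
theorem pvStep2_replicate (n : Nat) (s : Int) (l : List Int) :
    (PySem.List.enumerate (List.replicate n (none : Option Char)) s).foldl pvStep2 l = l := by
  induction n generalizing s with
  | zero => simp [PySem.List.enumerate_nil]
  | succ k ih =>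
      simp only [List.replicate_succ, PySem.List.enumerate_cons, List.foldl_cons]
      exact ih (s + 1)

-- the heart: A's running-index fold equals B's aggregation over the expanded board
theorem pv_main (cs : List Char) : ∀ (i : Nat) (l : List Int),
    cs.foldl pvStepA ((i : Int), l)
    = ((i : Int) + ((cs.flatMap pvSquares).length : Int),
       (PySem.List.enumerate (cs.flatMap pvSquares) (i : Int)).foldl pvStep2 l) := by
  induction cs with
  | nil => intro i l; simp [PySem.List.enumerate_nil]
  | cons c t ih =>
      intro i l
      simp only [List.foldl_cons, List.flatMap_cons]
      by_cases hd : PySem.Chars.isdigit c = true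
      · have hnn := pv_digit_nonneg c hd
        set d := (PySem.Int.ofChars? [c]).getD 0 with hdv
        have hstep : pvStepA ((i : Int), l) c = ((i : Int) + d, l) := by
          simp [pvStepA, hd, hdv]
        have hcast : (i : Int) + d = ((i + d.toNat : Nat) : Int) := by
          push_cast; omega
        rw [hstep, hcast, ih (i + d.toNat) l]
        have hsq : pvSquares c = List.replicate d.toNat (none : Option Char) := by
          simp [pvSquares, hd, hdv]
        rw [hsq, PySem.List.enumerate_append, List.foldl_append, pvStep2_replicate]
        simp only [Prod.mk.injEq, List.length_append, List.length_replicate]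
        refine ⟨by push_cast; ring, ?_⟩
        push_cast
        rfl
      · have hstep : pvStepA ((i : Int), l) c
            = ((i : Int) + 1, pvBump l c (i : Int)) := by
          simp [pvStepA, hd, pvBump]
        have hcast : (i : Int) + 1 = ((i + 1 : Nat) : Int) := by push_cast; ring
        rw [hstep, hcast, ih (i + 1) (pvBump l c (i : Int))]
        have hsq : pvSquares c = [some c] := by simp [pvSquares, hd]
        rw [hsq]
        simp only [List.singleton_append, PySem.List.enumerate_cons, List.foldl_cons,
          List.length_cons, Prod.mk.injEq]
        refine ⟨by push_cast; ring, ?_⟩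
        push_cast
        rfl

-- ===== VERDICT (by name: the statement is the Claim_ definition above) =====
theorem convert_fen_to_bbd_spec : Claim_equal_convert_fen_to_bbd := by
  intro str_array _ _
  unfold Spec_convert_fen_to_bbd convert_fen_to_bbd convert_fen_to_bbd_alt
  have h := pv_main
    (PySem.Chars.join []
      ((PySem.Chars.splitOn ((PySem.List.pyGet? str_array 0).getD "").toList ['/']).reverse))
    0 (List.replicate 12 0)
  simp only [Nat.cast_zero] at h
  simp only [pvBoard_eq, List.nil_append, h]
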